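-- pv_equiv track=rewrite | github.com/greedy17/ManagrAI | server/managr/comms/utils.py | split_and_combine_terms
-- ===== SOURCE A (Python) =====
-- def split_and_combine_terms(string):
--     terms = string.replace('"', "").replace("(", "").replace(")", "").split()
--     corrected_terms = []
--     current_term = ""
--     for idx, term in enumerate(terms):
--         if term in ["AND", "OR", "NOT"]:
--             corrected_terms.append(current_term)
--             current_term = ""
--             corrected_terms.append(term)
--         elif idx == len(terms) - 1:
--             if len(current_term):
--                 current_term += f" {term}"
--             else:
--                 current_term = term
--             corrected_terms.append(current_term)
--         else:
--             if len(current_term):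
--                 current_term += f" {term}"
--             else:
--                 current_term = term
--     return corrected_terms
-- ===== SOURCE B (Python) =====
-- def split_and_combine_terms(string):
--     terms = string.replace('"', "").replace("(", "").replace(")", "").split()
--     ops = [(i, t) for i, t in enumerate(terms) if t in ("AND", "OR", "NOT")]
--     out = []
--     start = 0
--     for i, t in ops:
--         out.append(" ".join(terms[start:i]))
--         out.append(t)
--         start = i + 1
--     if start < len(terms):
--         out.append(" ".join(terms[start:]))
--     return out
-- ===== Notes on version B (the rewrite author's own statement) =====
-- stated objective: alternative
-- what changed: Replaces A's single accumulating pass (growing current_term string, last-index flush) by an index-then-slice decomposition: collect the operator positions first, then emit the space-joined slice between consecutive operators, with a tail slice only when the input does not end on an operator.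
import Mathlib
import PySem

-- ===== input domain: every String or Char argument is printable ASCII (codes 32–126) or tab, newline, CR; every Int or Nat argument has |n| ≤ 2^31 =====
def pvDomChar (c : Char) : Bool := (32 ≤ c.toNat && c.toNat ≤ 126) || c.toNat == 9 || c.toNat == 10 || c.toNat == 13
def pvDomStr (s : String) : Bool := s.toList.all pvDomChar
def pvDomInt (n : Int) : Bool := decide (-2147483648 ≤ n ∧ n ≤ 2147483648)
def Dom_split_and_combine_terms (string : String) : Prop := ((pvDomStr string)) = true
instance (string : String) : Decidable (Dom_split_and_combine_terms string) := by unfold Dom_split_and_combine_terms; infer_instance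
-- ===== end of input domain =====

-- B replaces A's accumulating single pass by an operator-position/slice decomposition; same O(n) cost ("alternative").

-- shared first line of both Pythons: strip '"','(',')' and whitespace-split
def pvTerms (string : String) : List String :=
  PySem.Str.split₀
    (PySem.Str.replace (PySem.Str.replace (PySem.Str.replace string "\"" "") "(" "") ")" "")

-- ===== PORT A =====
-- the for-loop of A: state = (accumulated corrected_terms, current_term), idx counted, n = len(terms)
-- current_term update shared by A's two non-operator branches: add term, space-separated if nonempty
def pvUpd (cur t : String) : String :=
  if PySem.Str.len cur ≠ 0 then cur ++ " " ++ t else t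

def pvGoA (n : Nat) (idx : Nat) (acc : List String) (cur : String) : List String → List String
  | [] => acc
  | t :: rest =>
    if t ∈ (["AND", "OR", "NOT"] : List String) then
      pvGoA n (idx + 1) (acc ++ [cur, t]) "" rest
    else
      if idx = n - 1 then pvGoA n (idx + 1) (acc ++ [pvUpd cur t]) (pvUpd cur t) rest
      else pvGoA n (idx + 1) acc (pvUpd cur t) rest

def split_and_combine_terms (string : String) : List String :=
  let terms := pvTerms string
  pvGoA terms.length 0 [] "" terms

-- ===== PORT B =====
-- ops = [(i, t) for i, t in enumerate(terms) if t in ("AND","OR","NOT")]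
def pvOps (terms : List String) : List (Int × String) :=
  (PySem.List.enumerate terms).filter (fun p => p.2 ∈ (["AND", "OR", "NOT"] : List String))

-- the for-loop of B over ops, state = (out, start); the post-loop tail flush is the [] case
def pvGoB (terms : List String) : List (Int × String) → Int → List String → List String
  | [], start, out =>
      if start < (terms.length : Int) then
        out ++ [PySem.Str.join " " (PySem.List.slice terms (some start) none)]
      else out
  | (i, t) :: rest, start, out =>
      pvGoB terms rest (i + 1)
        (out ++ [PySem.Str.join " " (PySem.List.slice terms (some start) (some i)), t])

def split_and_combine_terms_alt (string : String) : List String :=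
  let terms := pvTerms string
  pvGoB terms (pvOps terms) 0 []

-- ===== PRECONDITION & SPEC =====
def Spec_split_and_combine_terms (string : String) (out : List String) : Prop := out = split_and_combine_terms_alt string
instance (string : String) (out : List String) : Decidable (Spec_split_and_combine_terms string out) := by unfold Spec_split_and_combine_terms; infer_instance

-- ===== CLAIM (what is proved, stated in full; the proofs are below) =====
def Claim_equal_split_and_combine_terms : Prop := ∀ (string : String), Dom_split_and_combine_terms string → Spec_split_and_combine_terms string (split_and_combine_terms string)

-- ===== LEMMAS AND PROOFS =====

-- spec function: flush-at-end grouping (g = current group of plain terms)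
def pvFS (g : List String) : List String → List String
  | [] => if g = [] then [] else [PySem.Str.join " " g]
  | t :: rest =>
    if t ∈ (["AND", "OR", "NOT"] : List String) then
      PySem.Str.join " " g :: t :: pvFS [] rest
    else pvFS (g ++ [t]) rest

-- spec function matching A's shape: flush at the last element
def pvFSpec (g : List String) : List String → List String
  | [] => []
  | [t] =>
    if t ∈ (["AND", "OR", "NOT"] : List String) then [PySem.Str.join " " g, t]
    else [PySem.Str.join " " (g ++ [t])]
  | t :: rest =>
    if t ∈ (["AND", "OR", "NOT"] : List String) then
      PySem.Str.join " " g :: t :: pvFSpec [] rest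
    else pvFSpec (g ++ [t]) rest

theorem pvString_toList_inj {s t : String} (h : s.toList = t.toList) : s = t :=
  String.toList_inj.mp h

theorem pvJoin_nil : PySem.Str.join " " ([] : List String) = "" := by
  apply pvString_toList_inj
  simp [PySem.Str.toList_join, PySem.Chars.join_nil]

theorem pvCharsJoin_snoc (sep p : List Char) (l : List (List Char)) :
    PySem.Chars.join sep (l ++ [p]) =
      if l = [] then p else PySem.Chars.join sep l ++ sep ++ p := by
  induction l with
  | nil => simp [PySem.Chars.join_singleton]
  | cons q l ih =>
    cases l with
    | nil =>
      simp [PySem.Chars.join_cons_cons, PySem.Chars.join_singleton]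
    | cons q' l' =>
      simp only [List.cons_append, PySem.Chars.join_cons_cons]
      rw [← List.cons_append, ih, if_neg (by simp)]
      simp [List.append_assoc]

theorem pvJoin_snoc (g : List String) (t : String) :
    PySem.Str.join " " (g ++ [t]) =
      if g = [] then t else PySem.Str.join " " g ++ " " ++ t := by
  by_cases hg : g = []
  · apply pvString_toList_inj
    simp [hg, PySem.Str.toList_join, PySem.Chars.join_singleton]
  · apply pvString_toList_inj
    rw [if_neg hg]
    rw [PySem.Str.toList_join, List.map_append, List.map_singleton,
      pvCharsJoin_snoc]
    rw [if_neg (by simpa using hg)]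
    simp [String.toList_append, PySem.Str.toList_join]

theorem pvJoin_len_ne (g : List String) (hg : g ≠ []) (hne : ∀ x ∈ g, x ≠ "") :
    PySem.Str.len (PySem.Str.join " " g) ≠ 0 := by
  cases g with
  | nil => exact absurd rfl hg
  | cons p rest =>
    rw [PySem.Str.len_eq]
    simp only [ne_eq, Nat.cast_eq_zero, List.length_eq_zero_iff]
    intro hcontra
    cases rest with
    | nil =>
      rw [PySem.Str.toList_join] at hcontra
      simp [PySem.Chars.join_singleton] at hcontra
      exact hne p (by simp) hcontra
    | cons q rest' =>
      rw [PySem.Str.toList_join] at hcontra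
      simp only [List.map_cons, PySem.Chars.join_cons_cons] at hcontra
      simp [List.append_eq_nil_iff] at hcontra

theorem pvFSpec_eq_pvFS (todo : List String) :
    ∀ g, (g = [] ∨ todo ≠ []) → pvFSpec g todo = pvFS g todo := by
  induction todo with
  | nil =>
    intro g h
    rcases h with h | h
    · simp [pvFSpec, pvFS, h]
    · exact absurd rfl h
  | cons t rest ih =>
    intro g _
    cases rest with
    | nil =>
      by_cases hop : t ∈ (["AND", "OR", "NOT"] : List String) <;>
        simp [pvFSpec, pvFS, hop]
    | cons t' rest' =>
      by_cases hop : t ∈ (["AND", "OR", "NOT"] : List String)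
      · simp [pvFSpec, pvFS, hop, ih [] (Or.inl rfl)]
      · simp [pvFSpec, pvFS, hop, ih (g ++ [t]) (Or.inr (by simp))]

theorem pvGoA_eq (todo : List String) :
    ∀ (g acc : List String) (idx n : Nat), n = idx + todo.length →
      (∀ x ∈ todo, x ≠ "") → (∀ x ∈ g, x ≠ "") →
      pvGoA n idx acc (PySem.Str.join " " g) todo = acc ++ pvFSpec g todo := by
  induction todo with
  | nil =>
    intro g acc idx n _ _ _
    simp [pvGoA, pvFSpec]
  | cons t rest ih =>
    intro g acc idx n hn htodo hg
    by_cases hop : t ∈ (["AND", "OR", "NOT"] : List String)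
    · rw [show pvGoA n idx acc (PySem.Str.join " " g) (t :: rest)
          = pvGoA n (idx + 1) (acc ++ [PySem.Str.join " " g, t]) "" rest from by
        simp [pvGoA, hop]]
      rw [← pvJoin_nil]
      rw [ih [] (acc ++ [PySem.Str.join " " g, t]) (idx + 1) n
        (by simp at hn ⊢; omega) (fun x hx => htodo x (by simp [hx])) (by simp)]
      cases rest <;> simp [pvFSpec, hop]
    · have hcur : pvUpd (PySem.Str.join " " g) t = PySem.Str.join " " (g ++ [t]) := by
        rw [pvJoin_snoc]
        by_cases hgnil : g = []
        · rw [if_pos hgnil]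
          subst hgnil
          rw [pvJoin_nil]
          simp [pvUpd, PySem.Str.len_eq]
        · rw [if_neg hgnil]
          simp only [pvUpd]
          rw [if_pos (pvJoin_len_ne g hgnil hg)]
      have hg' : ∀ x ∈ g ++ [t], x ≠ "" := by
        intro x hx
        rcases List.mem_append.mp hx with h | h
        · exact hg x h
        · simp at h; subst h; exact htodo x (by simp)
      cases rest with
      | nil =>
        have hlast : idx = n - 1 := by simp at hn; omega
        rw [show pvGoA n idx acc (PySem.Str.join " " g) [t]
            = pvGoA n (idx + 1) (acc ++ [PySem.Str.join " " (g ++ [t])])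
                (PySem.Str.join " " (g ++ [t])) [] from by
          conv_lhs => rw [pvGoA]
          rw [if_neg hop, if_pos hlast, hcur]]
        simp [pvGoA, pvFSpec, hop]
      | cons t' rest' =>
        have hlast : ¬ idx = n - 1 := by simp at hn; omega
        rw [show pvGoA n idx acc (PySem.Str.join " " g) (t :: t' :: rest')
            = pvGoA n (idx + 1) acc (PySem.Str.join " " (g ++ [t])) (t' :: rest') from by
          conv_lhs => rw [pvGoA]
          rw [if_neg hop, if_neg hlast, hcur]]
        rw [ih (g ++ [t]) acc (idx + 1) n (by simp at hn ⊢; omega)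
          (fun x hx => htodo x (by simp [hx])) hg']
        simp [pvFSpec, hop]

theorem pvGoB_eq (terms : List String) (todo : List String) :
    ∀ (pre g : List String), terms = pre ++ g ++ todo → ∀ (i j : Int),
      i = ((pre.length : Nat) : Int) → j = ((pre.length + g.length : Nat) : Int) → ∀ out,
      pvGoB terms
          ((PySem.List.enumerate todo j).filter
            (fun p => p.2 ∈ (["AND", "OR", "NOT"] : List String)))
          i out
        = out ++ pvFS g todo := by
  induction todo with
  | nil =>
    intro pre g hterms i j hi hj out
    subst hi hj
    simp only [PySem.List.enumerate_nil, List.filter_nil, pvGoB]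
    by_cases hgnil : g = []
    · rw [if_neg]
      · simp [pvFS, hgnil]
      · subst hterms hgnil
        simp
    · rw [if_pos]
      · rw [PySem.List.slice_from_natCast]
        subst hterms
        rw [List.append_nil, List.drop_left]
        simp [pvFS, hgnil]
      · subst hterms
        have : 0 < g.length := List.length_pos_iff.mpr hgnil
        simp only [List.append_nil, List.length_append]
        push_cast
        omega
  | cons t rest ih =>
    intro pre g hterms i j hi hj out
    rw [PySem.List.enumerate_cons]
    by_cases hop : t ∈ (["AND", "OR", "NOT"] : List String)
    · obtain h3 : t = "AND" ∨ t = "OR" ∨ t = "NOT" := by simpa using hop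
      rw [show List.filter (fun p => decide (p.2 ∈ (["AND", "OR", "NOT"] : List String)))
            ((j, t) :: PySem.List.enumerate rest (j + 1))
          = (j, t) :: List.filter (fun p => decide (p.2 ∈ (["AND", "OR", "NOT"] : List String)))
              (PySem.List.enumerate rest (j + 1)) from by
        rcases h3 with h | h | h <;> simp [h]]
      rw [pvGoB]
      have hslice : PySem.List.slice terms (some i) (some j) = g := by
        subst hi hj
        rw [PySem.List.slice_natCast]
        subst hterms
        rw [List.append_assoc, List.drop_left]
        simp
      rw [hslice]
      rw [ih (pre ++ g ++ [t]) []
        (by subst hterms; simp) (j + 1) (j + 1)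
        (by subst hj; simp; ring)
        (by subst hj; simp; ring)
        (out ++ [PySem.Str.join " " g, t])]
      simp [pvFS, hop]
    · obtain ⟨h1, h2, h3⟩ : ¬t = "AND" ∧ ¬t = "OR" ∧ ¬t = "NOT" := by simpa using hop
      rw [show List.filter (fun p => decide (p.2 ∈ (["AND", "OR", "NOT"] : List String)))
            ((j, t) :: PySem.List.enumerate rest (j + 1))
          = List.filter (fun p => decide (p.2 ∈ (["AND", "OR", "NOT"] : List String)))
              (PySem.List.enumerate rest (j + 1)) from by
        simp [h1, h2, h3]]
      rw [ih pre (g ++ [t]) (by subst hterms; simp) i (j + 1) hi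
        (by subst hj; simp; ring) out]
      simp [pvFS, hop]

theorem pvSplitGo_ne (s : List Char) :
    ∀ (cur : List Char) (acc : List (List Char)), (∀ a ∈ acc, a ≠ ([] : List Char)) →
      ∀ x ∈ PySem.Chars.split₀.go s cur acc, x ≠ [] := by
  induction s with
  | nil =>
    intro cur acc hacc x hx
    simp only [PySem.Chars.split₀.go] at hx
    by_cases hcur : cur.isEmpty
    · rw [if_pos hcur] at hx
      exact hacc x (List.mem_reverse.mp hx)
    · rw [if_neg hcur] at hx
      have hcne : cur ≠ [] := by simpa [List.isEmpty_iff] using hcur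
      rcases List.mem_cons.mp (List.mem_reverse.mp hx) with h | h
      · subst h
        simpa using hcne
      · exact hacc x h
  | cons c s ih =>
    intro cur acc hacc x hx
    simp only [PySem.Chars.split₀.go] at hx
    by_cases hsp : PySem.Chars.isspace c
    · rw [if_pos hsp] at hx
      by_cases hcur : cur.isEmpty
      · rw [if_pos hcur] at hx
        exact ih [] acc hacc x hx
      · rw [if_neg hcur] at hx
        have hcne : cur ≠ [] := by simpa [List.isEmpty_iff] using hcur
        refine ih [] (cur.reverse :: acc) ?_ x hx
        intro a ha
        rcases List.mem_cons.mp ha with h | h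
        · subst h
          simpa using hcne
        · exact hacc a h
    · rw [if_neg hsp] at hx
      exact ih (c :: cur) acc hacc x hx

theorem pvSplit_ne (s : String) : ∀ t ∈ PySem.Str.split₀ s, t ≠ "" := by
  intro t ht hcontra
  simp only [PySem.Str.split₀, PySem.Chars.split₀, List.mem_map] at ht
  rcases ht with ⟨x, hx, hxt⟩
  have hxne : x ≠ [] := pvSplitGo_ne s.toList [] [] (by simp) x hx
  apply hxne
  have : (String.ofList x).toList = ("" : String).toList := by rw [hxt, hcontra]
  simpa using this

-- ===== VERDICT (by name: the statement is the Claim_ definition above) =====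
theorem split_and_combine_terms_spec : Claim_equal_split_and_combine_terms := by
  intro s _
  unfold Spec_split_and_combine_terms split_and_combine_terms split_and_combine_terms_alt
  have hne : ∀ x ∈ pvTerms s, x ≠ "" := pvSplit_ne _
  have hA := pvGoA_eq (pvTerms s) [] [] 0 (pvTerms s).length (by simp) hne (by simp)
  have hB := pvGoB_eq (pvTerms s) (pvTerms s) [] [] (by simp) 0 0 (by simp) (by simp) []
  simp only [pvJoin_nil] at hA
  rw [show (have terms := pvTerms s;
        pvGoA terms.length 0 [] "" terms) = pvGoA (pvTerms s).length 0 [] "" (pvTerms s) from rfl]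
  rw [hA, pvFSpec_eq_pvFS _ _ (Or.inl rfl)]
  exact hB.symm
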